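-- pv_equiv track=rewrite | github.com/adamb56789/RummikubSolver | rummi.py | split_tuple
-- ===== SOURCE A (Python) =====
-- def split_tuple(t):
--     n = len(t)
--     if n < 6:
--         raise ValueError("Tuple must have length at least 6")
--
--     result = []
--     i = 0
--
--     while n > 0:
--         if n == 6:
--             sizes = (3, 3)
--         elif n == 7:
--             sizes = (3, 4)
--         elif n == 8:
--             sizes = (4, 4)
--         elif n == 9:
--             sizes = (4, 5)
--         else:
--             sizes = (5,)
--
--         for s in sizes:
--             result.append(t[i:i + s])
--             i += s
--             n -= s
--
--     return result
-- ===== SOURCE B (Python) =====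
-- def split_tuple(t):
--     n = len(t)
--     if n < 6:
--         raise ValueError("Tuple must have length at least 6")
--     tail = {5: [5], 6: [3, 3], 7: [3, 4], 8: [4, 4], 9: [4, 5]}
--     r = (n - 5) % 5 + 5
--     sizes = [5] * ((n - r) // 5) + tail[r]
--     result = []
--     i = 0
--     for s in sizes:
--         result.append(t[i:i + s])
--         i += s
--     return result
-- ===== Notes on version B (the rewrite author's own statement) =====
-- stated objective: simpler
-- what changed: Replaces A's while-loop that repeatedly subtracts chunk sizes from a running remainder with a closed-form computation of the chunk-size list (r=(n-5)%5+5, [5]*((n-r)//5) plus a fixed tail table) followed by one slicing pass.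
import Mathlib
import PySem

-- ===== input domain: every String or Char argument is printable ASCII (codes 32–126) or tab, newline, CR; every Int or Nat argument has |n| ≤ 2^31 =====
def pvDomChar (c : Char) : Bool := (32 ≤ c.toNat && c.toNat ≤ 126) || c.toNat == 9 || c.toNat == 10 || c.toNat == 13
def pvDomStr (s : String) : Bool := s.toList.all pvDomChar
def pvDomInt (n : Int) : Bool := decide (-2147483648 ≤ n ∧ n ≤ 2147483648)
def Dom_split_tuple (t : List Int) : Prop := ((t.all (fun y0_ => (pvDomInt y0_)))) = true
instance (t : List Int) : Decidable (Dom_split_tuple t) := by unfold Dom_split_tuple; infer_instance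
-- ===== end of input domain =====

-- B replaces A's subtract-and-loop remainder bookkeeping with a closed-form chunk-size list
-- followed by one slicing pass (objective: simpler).

-- ===== PORT A =====
-- the while loop of A: n = remaining length, i = current offset; each iteration appends
-- t[i:i+s] for each s in sizes and decreases n accordingly
def goA (t : List Int) (i : Nat) (n : Nat) : List (List Int) :=
  if n = 0 then []
  else if n = 6 then
    [PySem.List.slice t (some (i : Int)) (some ((i + 3 : Nat) : Int)),
     PySem.List.slice t (some ((i + 3 : Nat) : Int)) (some ((i + 6 : Nat) : Int))]
  else if n = 7 then
    [PySem.List.slice t (some (i : Int)) (some ((i + 3 : Nat) : Int)),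
     PySem.List.slice t (some ((i + 3 : Nat) : Int)) (some ((i + 7 : Nat) : Int))]
  else if n = 8 then
    [PySem.List.slice t (some (i : Int)) (some ((i + 4 : Nat) : Int)),
     PySem.List.slice t (some ((i + 4 : Nat) : Int)) (some ((i + 8 : Nat) : Int))]
  else if n = 9 then
    [PySem.List.slice t (some (i : Int)) (some ((i + 4 : Nat) : Int)),
     PySem.List.slice t (some ((i + 4 : Nat) : Int)) (some ((i + 9 : Nat) : Int))]
  else
    PySem.List.slice t (some (i : Int)) (some ((i + 5 : Nat) : Int)) :: goA t (i + 5) (n - 5)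
termination_by n
decreasing_by omega

def split_tuple (t : List Int) : List (List Int) :=
  -- Python raises ValueError when t.length < 6; those inputs are excluded by Pre_split_tuple
  goA t 0 t.length

-- ===== PORT B =====
-- the tail table {5:[5], 6:[3,3], 7:[3,4], 8:[4,4], 9:[4,5]}
def tailB (r : Nat) : List Nat :=
  if r = 5 then [5] else if r = 6 then [3, 3] else if r = 7 then [3, 4]
  else if r = 8 then [4, 4] else [4, 5]

-- the single slicing pass over the size list
def goB (t : List Int) (i : Nat) : List Nat → List (List Int)
  | [] => []
  | s :: ss => PySem.List.slice t (some (i : Int)) (some ((i + s : Nat) : Int)) :: goB t (i + s) ss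

def split_tuple_alt (t : List Int) : List (List Int) :=
  let n := t.length
  let r := (n - 5) % 5 + 5
  let sizes := List.replicate ((n - r) / 5) 5 ++ tailB r
  goB t 0 sizes

-- ===== PRECONDITION & SPEC =====
-- Pre_ excludes exactly the inputs on which A (and B) raise ValueError: length < 6.
def Pre_split_tuple (t : List Int) : Prop := 6 ≤ t.length
instance (t : List Int) : Decidable (Pre_split_tuple t) := by unfold Pre_split_tuple; infer_instance
def pvWitness_split_tuple : List Int := [1, 2, 3, 4, 5, 6]

def Spec_split_tuple (t : List Int) (out : List (List Int)) : Prop := out = split_tuple_alt t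
instance (t : List Int) (out : List (List Int)) : Decidable (Spec_split_tuple t out) := by unfold Spec_split_tuple; infer_instance

-- ===== CLAIM (what is proved, stated in full; the proofs are below) =====
def Claim_equal_split_tuple : Prop := ∀ (t : List Int), Dom_split_tuple t → Pre_split_tuple t → Spec_split_tuple t (split_tuple t)

-- ===== LEMMAS AND PROOFS =====

-- the closed-form size list B computes for remaining length n
def sizesSpec (n : Nat) : List Nat :=
  List.replicate ((n - ((n - 5) % 5 + 5)) / 5) 5 ++ tailB ((n - 5) % 5 + 5)

lemma sizesSpec_step (n : Nat) (h : 10 ≤ n) : sizesSpec n = 5 :: sizesSpec (n - 5) := by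
  unfold sizesSpec
  have h1 : (n - 5 - 5) % 5 + 5 = (n - 5) % 5 + 5 := by omega
  have h2 : (n - ((n - 5) % 5 + 5)) / 5 = (n - 5 - ((n - 5) % 5 + 5)) / 5 + 1 := by omega
  rw [h1, h2, List.replicate_succ]
  rfl

lemma goA_eq_goB (n : Nat) (h : 5 ≤ n) : ∀ (t : List Int) (i : Nat),
    goA t i n = goB t i (sizesSpec n) := by
  induction n using Nat.strong_induction_on with
  | _ n ih =>
    intro t i
    by_cases h9 : n ≤ 9
    · interval_cases n <;> simp [goA, goB, sizesSpec, tailB] <;> ring_nf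
    · rw [goA, sizesSpec_step n (by omega)]
      rw [if_neg (by omega), if_neg (by omega), if_neg (by omega), if_neg (by omega),
          if_neg (by omega)]
      rw [goB]
      exact congrArg _ (ih (n - 5) (by omega) (by omega) t (i + 5))

-- ===== VERDICT (by name: the statement is the Claim_ definition above) =====
theorem split_tuple_spec : Claim_equal_split_tuple := by
  intro t _ hpre
  show split_tuple t = split_tuple_alt t
  unfold split_tuple split_tuple_alt
  exact goA_eq_goB t.length (by exact le_trans (by omega) hpre) t 0
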